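-- pv_equiv track=rewrite | github.com/Alessio-Olivieri/mnlp | src/dataset.py | sentences_from_word_seq
-- ===== SOURCE A (Python) =====
-- def sentences_from_word_seq(words, y_pred):
--     sents, cur = [], []
--     for w, b in zip(words, y_pred):
--         cur.append(w)
--         if b == 1:  # boundary after this word
--             sents.append(cur); cur = []
--     if cur: sents.append(cur)
--     return sents
-- ===== SOURCE B (Python) =====
-- def sentences_from_word_seq(words, y_pred):
--     n = min(len(words), len(y_pred))
--     cuts = [i + 1 for i, b in enumerate(y_pred[:n]) if b == 1]
--     sents, start = [], 0
--     for c in cuts: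
--         sents.append(words[start:c])
--         start = c
--     if start < n:
--         sents.append(words[start:n])
--     return sents
-- ===== Notes on version B (the rewrite author's own statement) =====
-- stated objective: alternative
-- what changed: B first computes the list of cut positions (indices after boundary markers) and then builds each sentence by slicing words between consecutive cuts, instead of A's per-word accumulator list inside a single zip loop.
import Mathlib
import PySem

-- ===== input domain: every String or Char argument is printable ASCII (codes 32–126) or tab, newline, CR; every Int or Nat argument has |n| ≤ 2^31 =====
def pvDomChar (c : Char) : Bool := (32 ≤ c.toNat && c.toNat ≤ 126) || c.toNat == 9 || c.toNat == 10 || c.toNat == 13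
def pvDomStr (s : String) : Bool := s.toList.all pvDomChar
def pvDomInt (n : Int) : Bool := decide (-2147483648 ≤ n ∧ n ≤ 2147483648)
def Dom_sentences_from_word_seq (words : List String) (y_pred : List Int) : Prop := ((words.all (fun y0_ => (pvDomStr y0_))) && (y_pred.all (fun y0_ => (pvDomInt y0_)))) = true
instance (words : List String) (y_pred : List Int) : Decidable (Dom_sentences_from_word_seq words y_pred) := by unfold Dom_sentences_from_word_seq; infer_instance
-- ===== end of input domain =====

-- B re-groups by precomputed cut positions and slicing instead of A's per-word accumulator loop (objective: alternative decomposition, same O(n) cost).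

-- ===== PORT A =====
-- A-side helpers: the loop body and the trailing 'if cur: sents.append(cur)'
def stepA (st : List (List String) × List String) (p : String × Int) : List (List String) × List String :=
  let cur := st.2 ++ [p.1]
  if p.2 = 1 then (st.1 ++ [cur], []) else (st.1, cur)

def finishA (st : List (List String) × List String) : List (List String) :=
  if st.2 = [] then st.1 else st.1 ++ [st.2]

def sentences_from_word_seq (words : List String) (y_pred : List Int) : List (List String) :=
  finishA ((words.zip y_pred).foldl stepA ([], []))

-- ===== PORT B =====
-- B-side helper: the body of 'for c in cuts: sents.append(words[start:c]); start = c'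
def stepB (words : List String) (st : List (List String) × Int) (c : Int) : List (List String) × Int :=
  (st.1 ++ [PySem.List.slice words (some st.2) (some c)], c)

def sentences_from_word_seq_alt (words : List String) (y_pred : List Int) : List (List String) :=
  let n : Int := min (PySem.List.len words) (PySem.List.len y_pred)
  let cuts : List Int := (PySem.List.enumerate (PySem.List.slice y_pred (some 0) (some n))).filterMap
    (fun p => if p.2 = 1 then some (p.1 + 1) else none)
  let r := cuts.foldl (stepB words) ([], 0)
  if r.2 < n then r.1 ++ [PySem.List.slice words (some r.2) (some n)] else r.1

-- ===== PRECONDITION & SPEC =====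
def Spec_sentences_from_word_seq (words : List String) (y_pred : List Int) (out : List (List String)) : Prop := out = sentences_from_word_seq_alt words y_pred
instance (words : List String) (y_pred : List Int) (out : List (List String)) : Decidable (Spec_sentences_from_word_seq words y_pred out) := by unfold Spec_sentences_from_word_seq; infer_instance

-- ===== CLAIM (what is proved, stated in full; the proofs are below) =====
def Claim_equal_sentences_from_word_seq : Prop := ∀ (words : List String) (y_pred : List Int), Dom_sentences_from_word_seq words y_pred → Spec_sentences_from_word_seq words y_pred (sentences_from_word_seq words y_pred)

-- ===== LEMMAS AND PROOFS =====

-- canonical recursive grouping both ports are reduced to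
def prependG (cur : List String) : List (List String) → List (List String)
  | [] => [cur]
  | g :: t => (cur ++ g) :: t

def gA : List (String × Int) → List (List String)
  | [] => []
  | p :: zs => if p.2 = 1 then [p.1] :: gA zs else prependG [p.1] (gA zs)

-- ---- A side ----
theorem finishA_foldl_acc (zs : List (String × Int)) :
    ∀ sents cur, finishA (zs.foldl stepA (sents, cur)) = sents ++ finishA (zs.foldl stepA ([], cur)) := by
  induction zs with
  | nil =>
      intro sents cur
      simp [finishA]; split <;> simp
  | cons z zs ih =>
      intro sents cur
      simp only [List.foldl_cons, stepA, List.nil_append]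
      split
      · rw [ih (sents ++ [cur ++ [z.1]]), ih [cur ++ [z.1]]]
        simp
      · exact ih sents (cur ++ [z.1])

theorem prependG_prependG (w : String) (cur : List String) (gs : List (List String)) :
    prependG cur (prependG [w] gs) = prependG (cur ++ [w]) gs := by
  cases gs <;> simp [prependG]

theorem finishA_foldl_cur (zs : List (String × Int)) :
    ∀ cur, cur ≠ [] → finishA (zs.foldl stepA ([], cur)) = prependG cur (finishA (zs.foldl stepA ([], []))) := by
  induction zs with
  | nil =>
      intro cur h
      simp [finishA, h, prependG]
  | cons z zs ih =>
      intro cur h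
      simp only [List.foldl_cons, stepA, List.nil_append]
      split
      · rw [finishA_foldl_acc zs [cur ++ [z.1]], finishA_foldl_acc zs [[z.1]]]
        simp [prependG]
      · rw [ih (cur ++ [z.1]) (by simp), ih [z.1] (by simp), prependG_prependG]

theorem A_eq_gA (zs : List (String × Int)) :
    finishA (zs.foldl stepA ([], [])) = gA zs := by
  induction zs with
  | nil => simp [finishA, gA]
  | cons z zs ih =>
      simp only [List.foldl_cons, stepA, gA, List.nil_append]
      split
      · rw [finishA_foldl_acc zs [[z.1]], ih]
        simp
      · rw [finishA_foldl_cur zs [z.1] (by simp), ih]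

-- ---- B side: a Nat-indexed model of B ----
def cutsAt : List Int → Nat → List Nat
  | [], _ => []
  | b :: bs, s => if b = 1 then (s + 1) :: cutsAt bs (s + 1) else cutsAt bs (s + 1)

def stepBN (ws : List String) (st : List (List String) × Nat) (c : Nat) : List (List String) × Nat :=
  (st.1 ++ [(ws.drop st.2).take (c - st.2)], c)

def modelB (ws : List String) (m : Nat) (cs : List Nat) : List (List String) :=
  let r := cs.foldl (stepBN ws) ([], 0)
  if r.2 < m then r.1 ++ [(ws.drop r.2).take (m - r.2)] else r.1

theorem cuts_eq_cutsAt (xs : List Int) :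
    ∀ s : Nat, (PySem.List.enumerate xs (s : Int)).filterMap
        (fun p => if p.2 = 1 then some (p.1 + 1) else none)
      = (cutsAt xs s).map (Nat.cast : Nat → Int) := by
  induction xs with
  | nil => intro s; simp [PySem.List.enumerate_nil, cutsAt]
  | cons b bs ih =>
      intro s
      have hs : (s : Int) + 1 = ((s + 1 : Nat) : Int) := by push_cast; ring
      by_cases hb : b = 1
      · rw [PySem.List.enumerate_cons,
          List.filterMap_cons_some (l := PySem.List.enumerate bs ((s : Int) + 1)) (b := (s : Int) + 1)
            (by simp [hb]), cutsAt, if_pos hb, List.map_cons, hs, ih (s + 1)]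
      · rw [PySem.List.enumerate_cons,
          List.filterMap_cons_none (l := PySem.List.enumerate bs ((s : Int) + 1)) (by simp [hb]),
          cutsAt, if_neg hb, hs, ih (s + 1)]

theorem foldB_eq_foldBN (words : List String) (cs : List Nat) :
    ∀ sents (s : Nat), (cs.map (Nat.cast : Nat → Int)).foldl (stepB words) (sents, (s : Int))
      = ((cs.foldl (stepBN words) (sents, s)).1, ((cs.foldl (stepBN words) (sents, s)).2 : Int)) := by
  induction cs with
  | nil => intro sents s; simp
  | cons c cs ih =>
      intro sents s
      simp only [List.map_cons, List.foldl_cons, stepB, stepBN, PySem.List.slice_natCast]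
      exact ih _ c

theorem cutsAt_shift (xs : List Int) :
    ∀ s : Nat, cutsAt xs (s + 1) = (cutsAt xs s).map (· + 1) := by
  induction xs with
  | nil => intro s; simp [cutsAt]
  | cons b bs ih =>
      intro s
      simp only [cutsAt, ih (s + 1)]
      split <;> simp

theorem foldBN_shift (w : String) (ws : List String) (cs : List Nat) :
    ∀ sents (s : Nat), (cs.map (· + 1)).foldl (stepBN (w :: ws)) (sents, s + 1)
      = ((cs.foldl (stepBN ws) (sents, s)).1, (cs.foldl (stepBN ws) (sents, s)).2 + 1) := by
  induction cs with
  | nil => intro sents s; simp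
  | cons c cs ih =>
      intro sents s
      simp only [List.map_cons, List.foldl_cons, stepBN, List.drop_succ_cons,
        Nat.succ_sub_succ]
      exact ih _ c

theorem foldBN_acc (ws : List String) (cs : List Nat) :
    ∀ sents (s : Nat), cs.foldl (stepBN ws) (sents, s)
      = (sents ++ (cs.foldl (stepBN ws) ([], s)).1, (cs.foldl (stepBN ws) ([], s)).2) := by
  induction cs with
  | nil => intro sents s; simp
  | cons c cs ih =>
      intro sents s
      simp only [List.foldl_cons, stepBN, List.nil_append]
      rw [ih (sents ++ [(ws.drop s).take (c - s)]) c, ih [(ws.drop s).take (c - s)] c]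
      simp

-- B's model satisfies the same recursion as gA
theorem modelB_cons_boundary (w : String) (ws : List String) (m : Nat) (cs : List Nat) :
    modelB (w :: ws) (m + 1) (1 :: cs.map (· + 1)) = [w] :: modelB ws m cs := by
  simp only [modelB, List.foldl_cons, stepBN, List.nil_append, List.drop_zero, Nat.sub_zero]
  have hsh := foldBN_shift w ws cs [List.take 1 (w :: ws)] 0
  simp only [Nat.zero_add] at hsh
  rw [hsh, foldBN_acc ws cs [List.take 1 (w :: ws)] 0]
  set r := cs.foldl (stepBN ws) ([], 0) with hr
  simp only [List.drop_succ_cons, Nat.succ_sub_succ, Nat.add_lt_add_iff_right]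
  by_cases hlt : r.2 < m
  · simp [hlt, List.take_succ_cons]
  · simp [hlt, List.take_succ_cons]

theorem modelB_cons_mid (w : String) (ws : List String) (m c : Nat) (cs : List Nat) :
    modelB (w :: ws) (m + 1) ((c + 1) :: cs.map (· + 1)) = prependG [w] (modelB ws m (c :: cs)) := by
  simp only [modelB, List.foldl_cons, stepBN, List.nil_append, List.drop_zero, Nat.sub_zero]
  rw [foldBN_shift w ws cs [List.take (c + 1) (w :: ws)] c,
    foldBN_acc ws cs [List.take (c + 1) (w :: ws)] c, foldBN_acc ws cs [List.take c ws] c]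
  set r := cs.foldl (stepBN ws) ([], c) with hr
  simp only [List.take_succ_cons, List.drop_succ_cons, Nat.succ_sub_succ, Nat.add_lt_add_iff_right]
  by_cases hlt : r.2 < m
  · simp [hlt, prependG]
  · simp [hlt, prependG]

theorem modelB_cons_nil (w : String) (ws : List String) (m : Nat) :
    modelB (w :: ws) (m + 1) [] = prependG [w] (modelB ws m []) := by
  simp only [modelB, List.foldl_nil]
  rcases Nat.eq_zero_or_pos m with h0 | hpos
  · simp [h0, prependG]
  · rw [if_pos (by omega), if_pos (by omega)]
    simp [prependG, List.take_succ_cons]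

theorem modelB_eq_gA (ws : List String) :
    ∀ bs : List Int, modelB ws (min ws.length bs.length) (cutsAt (bs.take (min ws.length bs.length)) 0)
      = gA (ws.zip bs) := by
  induction ws with
  | nil => intro bs; simp [modelB, cutsAt, gA]
  | cons w ws ih =>
      intro bs
      cases bs with
      | nil => simp [modelB, cutsAt, gA]
      | cons b bs =>
          have hmin : min (w :: ws).length (b :: bs).length = min ws.length bs.length + 1 := by
            simp [Nat.succ_min_succ]
          set m := min ws.length bs.length with hm
          rw [hmin]
          have htake : (b :: bs).take (m + 1) = b :: bs.take m := by simp
          rw [htake]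
          have hcut : cutsAt (b :: bs.take m) 0
              = if b = 1 then 1 :: (cutsAt (bs.take m) 0).map (· + 1)
                else (cutsAt (bs.take m) 0).map (· + 1) := by
            simp only [cutsAt, Nat.zero_add, cutsAt_shift]
          rw [hcut]
          have hgz : gA ((w :: ws).zip (b :: bs)) =
              if b = 1 then [w] :: gA (ws.zip bs) else prependG [w] (gA (ws.zip bs)) := by
            simp [gA]
          rw [hgz, ← ih bs]
          by_cases hb : b = 1
          · rw [if_pos hb, if_pos hb, modelB_cons_boundary]
          · rw [if_neg hb, if_neg hb]
            cases hc : cutsAt (bs.take m) 0 with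
            | nil => rw [List.map_nil]; exact modelB_cons_nil w ws m
            | cons c ct => rw [List.map_cons]; exact modelB_cons_mid w ws m c ct

-- port B coincides with its Nat model
theorem B_eq_model (words : List String) (y_pred : List Int) :
    sentences_from_word_seq_alt words y_pred
      = modelB words (min words.length y_pred.length)
          (cutsAt (y_pred.take (min words.length y_pred.length)) 0) := by
  dsimp only [sentences_from_word_seq_alt]
  set m := min words.length y_pred.length with hm
  have hn : min (PySem.List.len words) (PySem.List.len y_pred) = ((m : Nat) : Int) := by
    simp [PySem.List.len_eq, hm]
  rw [hn]
  have hslice : PySem.List.slice y_pred (some (0 : Int)) (some ((m : Nat) : Int)) = y_pred.take m := by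
    rw [PySem.List.slice_zero_start, PySem.List.slice_to_natCast]
  rw [hslice]
  rw [show ((PySem.List.enumerate (y_pred.take m)) : List (Int × Int))
        = PySem.List.enumerate (y_pred.take m) ((0 : Nat) : Int) by norm_num]
  rw [cuts_eq_cutsAt]
  rw [show (0 : Int) = ((0 : Nat) : Int) by norm_num, foldB_eq_foldBN]
  set r := (cutsAt (y_pred.take m) 0).foldl (stepBN words) ([], 0) with hr
  simp only [modelB, Nat.cast_lt, PySem.List.slice_natCast]
  rw [← hr]

-- ===== VERDICT (by name: the statement is the Claim_ definition above) =====
theorem sentences_from_word_seq_spec : Claim_equal_sentences_from_word_seq := by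
  intro words y_pred _
  show sentences_from_word_seq words y_pred = sentences_from_word_seq_alt words y_pred
  rw [sentences_from_word_seq, A_eq_gA, B_eq_model, modelB_eq_gA]
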